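-- pv_equiv track=rewrite | github.com/SamAg19/PulseBridge | agent/services/doctor_matcher.py | _specialization_matches
-- ===== SOURCE A (Python) =====
-- def _specialization_matches(doctor_spec: str, requested_spec: str) -> bool:
--     """
--     Fuzzy match specializations
--
--     Handles variations like:
--     - "Cardiology" matches "Cardiologist"
--     - "Neuro" matches "Neurologist"
--     - Case-insensitive
--
--     Args:
--         doctor_spec: Doctor's registered specialization
--         requested_spec: Requested specialization from agent
--
--     Returns:
--         True if they match
--     """
--     doctor_spec_lower = doctor_spec.lower().strip()
--     requested_spec_lower = requested_spec.lower().strip()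
--
--     # Exact match
--     if doctor_spec_lower == requested_spec_lower:
--         return True
--
--     # Substring match (either direction)
--     if requested_spec_lower in doctor_spec_lower or doctor_spec_lower in requested_spec_lower:
--         return True
--
--     # Common variations mapping
--     variations = {
--         "cardiology": ["cardiologist", "cardiac", "heart specialist"],
--         "neurology": ["neurologist", "neuro", "neurological", "brain specialist"],
--         "dermatology": ["dermatologist", "derm", "skin specialist"],
--         "general": ["general practice", "general practitioner", "gp", "family medicine"],
--         "orthopedics": ["orthopedic", "ortho", "orthopedist"],
--         "psychiatry": ["psychiatrist", "mental health"],
--         "pediatrics": ["pediatrician", "child specialist"]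
--     }
--
--     # Check if either specialization matches any variation
--     for base, synonyms in variations.items():
--         if base in requested_spec_lower or any(syn in requested_spec_lower for syn in synonyms):
--             if base in doctor_spec_lower or any(syn in doctor_spec_lower for syn in synonyms):
--                 return True
--
--     return False
-- ===== SOURCE B (Python) =====
-- _GROUPS = [
--     ("cardiology", ["cardiologist", "cardiac", "heart specialist"]),
--     ("neurology", ["neurologist", "neuro", "neurological", "brain specialist"]),
--     ("dermatology", ["dermatologist", "derm", "skin specialist"]),
--     ("general", ["general practice", "general practitioner", "gp", "family medicine"]),
--     ("orthopedics", ["orthopedic", "ortho", "orthopedist"]),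
--     ("psychiatry", ["psychiatrist", "mental health"]),
--     ("pediatrics", ["pediatrician", "child specialist"]),
-- ]
--
-- # Flat pattern table: every base name / synonym tagged with its group's bit.
-- _PATTERNS = [(pat, 1 << i)
--              for i, (base, syns) in enumerate(_GROUPS)
--              for pat in [base] + syns]
--
--
-- def _mask(spec):
--     """Bitmask of the groups whose base or synonym occurs in spec."""
--     m = 0
--     for pat, bit in _PATTERNS:
--         if pat in spec:
--             m |= bit
--     return m
--
--
-- def _specialization_matches(doctor_spec: str, requested_spec: str) -> bool:
--     d = doctor_spec.lower().strip()
--     r = requested_spec.lower().strip()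
--     if d == r:
--         return True
--     if r in d or d in r:
--         return True
--     return _mask(d) & _mask(r) != 0
-- ===== Notes on version B (the rewrite author's own statement) =====
-- stated objective: alternative
-- what changed: The nested per-group existence loop over (base, synonyms) is replaced by a flat pattern table tagged with group bits, one linear scan per string accumulating a bitmask, and a bitwise-AND test for a shared group.
import Mathlib
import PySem

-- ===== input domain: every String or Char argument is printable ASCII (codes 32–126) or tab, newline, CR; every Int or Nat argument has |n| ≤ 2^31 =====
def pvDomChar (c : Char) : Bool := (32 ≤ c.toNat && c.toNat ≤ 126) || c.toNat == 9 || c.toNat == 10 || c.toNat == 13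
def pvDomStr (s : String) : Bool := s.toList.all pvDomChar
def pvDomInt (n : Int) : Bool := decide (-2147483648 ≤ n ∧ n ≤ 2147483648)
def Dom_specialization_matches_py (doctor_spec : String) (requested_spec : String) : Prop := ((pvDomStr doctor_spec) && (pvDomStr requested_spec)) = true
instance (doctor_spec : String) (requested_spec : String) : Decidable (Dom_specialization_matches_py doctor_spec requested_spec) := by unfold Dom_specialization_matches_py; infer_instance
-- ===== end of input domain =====

-- B replaces A's nested per-group existence loop by a flat pattern table tagged with
-- group bits, one linear scan per string accumulating a bitmask, and a bitwise-AND test.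

-- ===== PORT A =====
def pvVariations : List (String × List String) :=
  [("cardiology", ["cardiologist", "cardiac", "heart specialist"]),
   ("neurology", ["neurologist", "neuro", "neurological", "brain specialist"]),
   ("dermatology", ["dermatologist", "derm", "skin specialist"]),
   ("general", ["general practice", "general practitioner", "gp", "family medicine"]),
   ("orthopedics", ["orthopedic", "ortho", "orthopedist"]),
   ("psychiatry", ["psychiatrist", "mental health"]),
   ("pediatrics", ["pediatrician", "child specialist"])]

def specialization_matches_py (doctor_spec : String) (requested_spec : String) : Bool :=
  let doctor_spec_lower := PySem.Str.strip (PySem.Str.lower doctor_spec)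
  let requested_spec_lower := PySem.Str.strip (PySem.Str.lower requested_spec)
  if doctor_spec_lower == requested_spec_lower then true
  else if PySem.Str.isIn requested_spec_lower doctor_spec_lower ||
          PySem.Str.isIn doctor_spec_lower requested_spec_lower then true
  else
    pvVariations.any (fun p =>
      (PySem.Str.isIn p.1 requested_spec_lower ||
        p.2.any (fun syn => PySem.Str.isIn syn requested_spec_lower)) &&
      (PySem.Str.isIn p.1 doctor_spec_lower ||
        p.2.any (fun syn => PySem.Str.isIn syn doctor_spec_lower)))

-- ===== PORT B =====
-- Source B's module-level _PATTERNS comprehension, ported as the (static) table it computes: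
-- every base name / synonym tagged with its group's bit 1 <<< i
def pvPatterns : List (String × Nat) :=
  [("cardiology", 1), ("cardiologist", 1), ("cardiac", 1), ("heart specialist", 1),
   ("neurology", 2), ("neurologist", 2), ("neuro", 2), ("neurological", 2), ("brain specialist", 2),
   ("dermatology", 4), ("dermatologist", 4), ("derm", 4), ("skin specialist", 4),
   ("general", 8), ("general practice", 8), ("general practitioner", 8), ("gp", 8), ("family medicine", 8),
   ("orthopedics", 16), ("orthopedic", 16), ("ortho", 16), ("orthopedist", 16),
   ("psychiatry", 32), ("psychiatrist", 32), ("mental health", 32),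
   ("pediatrics", 64), ("pediatrician", 64), ("child specialist", 64)]

-- helper _mask: bitmask of the groups whose base or synonym occurs in spec
def pvMask (spec : String) : Nat :=
  pvPatterns.foldl (fun m p => if PySem.Str.isIn p.1 spec then m ||| p.2 else m) 0

def specialization_matches_py_alt (doctor_spec : String) (requested_spec : String) : Bool :=
  let d := PySem.Str.strip (PySem.Str.lower doctor_spec)
  let r := PySem.Str.strip (PySem.Str.lower requested_spec)
  if d == r then true
  else if PySem.Str.isIn r d || PySem.Str.isIn d r then true
  else (pvMask d &&& pvMask r) != 0

-- ===== PRECONDITION & SPEC =====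
def Spec_specialization_matches_py (doctor_spec : String) (requested_spec : String) (out : Bool) : Prop := out = specialization_matches_py_alt doctor_spec requested_spec
instance (doctor_spec : String) (requested_spec : String) (out : Bool) : Decidable (Spec_specialization_matches_py doctor_spec requested_spec out) := by unfold Spec_specialization_matches_py; infer_instance

-- ===== CLAIM (what is proved, stated in full; the proofs are below) =====
def Claim_equal_specialization_matches_py : Prop := ∀ (doctor_spec : String) (requested_spec : String), Dom_specialization_matches_py doctor_spec requested_spec → Spec_specialization_matches_py doctor_spec requested_spec (specialization_matches_py doctor_spec requested_spec)

-- ===== LEMMAS AND PROOFS =====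

-- one fold step of pvMask
def pvStep (m : Nat) (c : Bool) (b : Nat) : Nat := if c then m ||| b else m

-- the mask built from the seven per-group Booleans
def pvMask7 (a0 a1 a2 a3 a4 a5 a6 : Bool) : Nat :=
  pvStep (pvStep (pvStep (pvStep (pvStep (pvStep (pvStep 0 a0 1) a1 2) a2 4) a3 8) a4 16) a5 32) a6 64

-- two adjacent fold steps with the same bit merge into one
lemma pvStep_merge (m b : Nat) (c1 c2 : Bool) :
    pvStep (pvStep m c1 b) c2 b = pvStep m (c1 || c2) b := by
  cases c1 <;> cases c2 <;> simp [pvStep]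

-- the per-group condition (base or any synonym occurs in spec), right-associated
def pvG (spec : String) (pats : List String) : Bool := pats.any (fun pat => PySem.Str.isIn pat spec)

-- pvMask equals the seven-Boolean mask of the per-group conditions
lemma pvMask_eq (spec : String) :
    pvMask spec = pvMask7
      (pvG spec ["cardiology", "cardiologist", "cardiac", "heart specialist"])
      (pvG spec ["neurology", "neurologist", "neuro", "neurological", "brain specialist"])
      (pvG spec ["dermatology", "dermatologist", "derm", "skin specialist"])
      (pvG spec ["general", "general practice", "general practitioner", "gp", "family medicine"])
      (pvG spec ["orthopedics", "orthopedic", "ortho", "orthopedist"])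
      (pvG spec ["psychiatry", "psychiatrist", "mental health"])
      (pvG spec ["pediatrics", "pediatrician", "child specialist"]) := by
  show pvPatterns.foldl (fun m p => pvStep m (PySem.Str.isIn p.1 spec) p.2) 0 = _
  simp only [pvPatterns, List.foldl_cons, List.foldl_nil, pvStep_merge, pvMask7, pvG,
    List.any_cons, List.any_nil, Bool.or_false, Bool.or_assoc]

-- shared-bit test on two seven-Boolean masks = existence of a shared group
lemma pvMask7_land (a0 a1 a2 a3 a4 a5 a6 b0 b1 b2 b3 b4 b5 b6 : Bool) :
    ((pvMask7 a0 a1 a2 a3 a4 a5 a6 &&& pvMask7 b0 b1 b2 b3 b4 b5 b6) != 0)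
    = ((b0 && a0) || ((b1 && a1) || ((b2 && a2) || ((b3 && a3) ||
       ((b4 && a4) || ((b5 && a5) || (b6 && a6))))))) := by
  revert a0 a1 a2 a3 a4 a5 a6 b0 b1 b2 b3 b4 b5 b6; decide

-- A's existence loop over the variations table = B's bitmask intersection test
lemma pvAny_eq_land (d r : String) :
    pvVariations.any (fun p =>
      (PySem.Str.isIn p.1 r || p.2.any (fun syn => PySem.Str.isIn syn r)) &&
      (PySem.Str.isIn p.1 d || p.2.any (fun syn => PySem.Str.isIn syn d)))
    = ((pvMask d &&& pvMask r) != 0) := by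
  rw [pvMask_eq d, pvMask_eq r, pvMask7_land]
  simp only [pvVariations, pvG, List.any_cons, List.any_nil, Bool.or_false]

-- ===== VERDICT (by name: the statement is the Claim_ definition above) =====
theorem specialization_matches_py_spec : Claim_equal_specialization_matches_py := by
  intro doctor_spec requested_spec _
  unfold Spec_specialization_matches_py specialization_matches_py specialization_matches_py_alt
  simp only []
  split_ifs with h1 h2
  · rfl
  · rfl
  · exact pvAny_eq_land _ _
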